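-- pv_equiv track=rewrite | github.com/johannespaju/2024-fall-python | EX/ex08_recursion/recursion.py | x_sum_loop
-- ===== SOURCE A (Python) =====
-- def x_sum_loop(nums: list, x: int) -> int:
--     """
--     Given list 'nums' and a number called 'x' iteratively return sum of every x'th number in the list 'nums'.
--
--     In this task "indexing" starts from 1, so if 'x' = 2 and 'nums' = [2, 3, 4, -9], the output should be -6 (3 + -9).
--     'X' can also be negative, in that case indexing starts from the end of 'nums', see examples below.
--     If 'x' is 0, the sum should be 0 as well.
--
--     :param nums: list of integers
--     :param x: number indicating every which num to add to sum
--     :return: sum of every x'th number in the list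
--     """
--     if x == 0:
--         return 0
--     result = 0
--
--     if x > 0:
--         for i in range(x - 1, len(nums), x):
--             result += nums[i]
--
--     else:
--         for i in range(len(nums) + x, -1, x):
--             result += nums[i]
--
--     return result
-- ===== SOURCE B (Python) =====
-- def x_sum_loop(nums: list, x: int) -> int:
--     """Sum of every x'th element (1-based; negative x counts from the end)."""
--     if x == 0:
--         return 0
--     if x > 0:
--         return sum(v for i, v in enumerate(nums) if (i + 1) % x == 0)
--     return sum(v for i, v in enumerate(nums) if (len(nums) - i) % (-x) == 0)
-- ===== Notes on version B (the rewrite author's own statement) =====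
-- stated objective: alternative
-- what changed: B replaces A's stepped range loops (direct jumps to every x'th index, downward for negative x) by a single enumerate scan that selects elements with a modulo predicate on the position.
import Mathlib
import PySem

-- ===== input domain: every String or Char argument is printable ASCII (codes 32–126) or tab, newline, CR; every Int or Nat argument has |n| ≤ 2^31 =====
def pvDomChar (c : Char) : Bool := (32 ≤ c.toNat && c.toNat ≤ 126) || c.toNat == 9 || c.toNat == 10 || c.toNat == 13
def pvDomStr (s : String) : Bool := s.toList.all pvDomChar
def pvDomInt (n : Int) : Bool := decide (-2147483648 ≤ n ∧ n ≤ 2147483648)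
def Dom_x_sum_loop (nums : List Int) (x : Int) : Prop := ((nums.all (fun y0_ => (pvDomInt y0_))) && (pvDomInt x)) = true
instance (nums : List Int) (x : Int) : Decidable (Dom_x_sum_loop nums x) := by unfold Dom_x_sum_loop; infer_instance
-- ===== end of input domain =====

-- B sums by scanning enumerate with a modulo predicate instead of A's stepped range loops (alternative decomposition, same cost class).

-- ===== PORT A =====
-- A: stepped range loop; `nums[i]` ported as pyGetD (every index A dereferences is in range, so the default is never used).
def x_sum_loop (nums : List Int) (x : Int) : Int :=
  if x == 0 then 0
  else
    let result : Int := 0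
    if x > 0 then
      (PySem.List.pyRange (x - 1) nums.length x).foldl
        (fun r i => r + PySem.List.pyGetD nums i 0) result
    else
      (PySem.List.pyRange (nums.length + x) (-1) x).foldl
        (fun r i => r + PySem.List.pyGetD nums i 0) result

-- ===== PORT B =====
def x_sum_loop_alt (nums : List Int) (x : Int) : Int :=
  if x == 0 then 0
  else if x > 0 then
    (((PySem.List.enumerate nums).filter
        (fun p => PySem.Int.mod (p.1 + 1) x == 0)).map (·.2)).sum
  else
    (((PySem.List.enumerate nums).filter
        (fun p => PySem.Int.mod ((nums.length : Int) - p.1) (-x) == 0)).map (·.2)).sum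

-- ===== PRECONDITION & SPEC =====
def Spec_x_sum_loop (nums : List Int) (x : Int) (out : Int) : Prop := out = x_sum_loop_alt nums x
instance (nums : List Int) (x : Int) (out : Int) : Decidable (Spec_x_sum_loop nums x out) := by unfold Spec_x_sum_loop; infer_instance

-- ===== CLAIM (what is proved, stated in full; the proofs are below) =====
def Claim_equal_x_sum_loop : Prop := ∀ (nums : List Int) (x : Int), Dom_x_sum_loop nums x → Spec_x_sum_loop nums x (x_sum_loop nums x)

-- ===== LEMMAS AND PROOFS =====

lemma ediv_mid (t x : Int) (h1 : 0 ≤ t) (h2 : t < x) : (t + x) / x = 1 := by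
  have h : (t + x) / x = t / x + 1 := by
    have := Int.add_mul_ediv_right t 1 (by omega : x ≠ 0)
    simpa using this
  rw [h, Int.ediv_eq_zero_of_lt h1 h2]
  omega

lemma pyRange_succ_right_step (a b x : Int) (hx : 0 < x) :
    PySem.List.pyRange a (b + 1) x =
      PySem.List.pyRange a b x ++ (if a ≤ b ∧ x ∣ (b - a) then [b] else []) := by
  rw [PySem.List.pyRange_of_pos _ _ hx, PySem.List.pyRange_of_pos _ _ hx]
  by_cases hab : a ≤ b
  · by_cases hd : x ∣ b - a
    · obtain ⟨q, hq⟩ := hd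
      have hq0 : 0 ≤ q := by nlinarith [hq]
      have hxq : x * (q + 1) = x * q + x := by ring
      have c1 : (if a < b + 1 then ((b + 1 - a + x - 1) / x).toNat else 0) = q.toNat + 1 := by
        rw [if_pos (by omega : a < b + 1)]
        have e1 : (b + 1 - a + x - 1) = x * (q + 1) := by omega
        rw [e1, Int.mul_ediv_cancel_left _ (by omega : x ≠ 0)]
        omega
      have c0 : (if a < b then ((b - a + x - 1) / x).toNat else 0) = q.toNat := by
        by_cases h2 : a < b
        · have e0 : b - a + x - 1 = (x - 1) + x * q := by omega
          rw [if_pos h2, e0, Int.add_mul_ediv_left _ _ (by omega : x ≠ 0),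
            Int.ediv_eq_zero_of_lt (by omega) (by omega)]
          omega
        · have : q = 0 := by nlinarith [hq]
          simp [h2, this]
      rw [c1, c0, if_pos (show a ≤ b ∧ x ∣ b - a from ⟨hab, ⟨q, hq⟩⟩)]
      rw [List.range_succ, List.map_append]
      congr 1
      have hcast : ((q.toNat : Nat) : Int) = q := by omega
      simp [hcast]
      omega
    · have hlt : a < b := by
        rcases lt_or_eq_of_le hab with h | h
        · exact h
        · exact absurd (by simp [← h]) hd
      set q := (b - a) / x with hqdef
      set r := (b - a) % x with hrdef
      have hdm : x * q + r = b - a := by rw [hqdef, hrdef]; exact Int.mul_ediv_add_emod _ _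
      have hr0 : 0 ≤ r := Int.emod_nonneg _ (by omega)
      have hrx : r < x := Int.emod_lt_of_pos _ hx
      have hrne : r ≠ 0 := by
        intro h; exact hd ⟨q, by omega⟩
      have c1 : (if a < b + 1 then ((b + 1 - a + x - 1) / x).toNat else 0) = q.toNat + 1 := by
        rw [if_pos (by omega : a < b + 1)]
        have e : b + 1 - a + x - 1 = (r + x) + x * q := by omega
        rw [e, Int.add_mul_ediv_left _ _ (by omega : x ≠ 0), ediv_mid r x hr0 hrx]
        have hq0 : 0 ≤ q := Int.ediv_nonneg (by omega) (by omega)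
        omega
      have c0 : (if a < b then ((b - a + x - 1) / x).toNat else 0) = q.toNat + 1 := by
        rw [if_pos hlt]
        have e : b - a + x - 1 = ((r - 1) + x) + x * q := by omega
        rw [e, Int.add_mul_ediv_left _ _ (by omega : x ≠ 0), ediv_mid (r - 1) x (by omega) (by omega)]
        have hq0 : 0 ≤ q := Int.ediv_nonneg (by omega) (by omega)
        omega
      have hn1 : ¬ (a ≤ b ∧ x ∣ b - a) := fun h => hd h.2
      rw [c1, c0, if_neg hn1]
      simp
  · have hn1 : ¬ (a ≤ b ∧ x ∣ b - a) := fun h => hab h.1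
    have h2 : ¬ a < b + 1 := by omega
    have h3 : ¬ a < b := by omega
    rw [if_neg hn1, if_neg h2, if_neg h3]
    simp

lemma pyRange_neg_shift (a b y : Int) (hy : 0 < y) :
    PySem.List.pyRange (a + 1) (b + 1) (-y) =
      (PySem.List.pyRange a b (-y)).map (· + 1) := by
  rw [PySem.List.pyRange_of_neg _ _ (by omega : (-y) < 0),
    PySem.List.pyRange_of_neg _ _ (by omega : (-y) < 0), List.map_map]
  have hc : (if b + 1 < a + 1 then ((a + 1 - (b + 1) + - -y - 1) / - -y).toNat else 0)
      = (if b < a then ((a - b + - -y - 1) / - -y).toNat else 0) := by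
    by_cases h : b < a
    · rw [if_pos (by omega : b + 1 < a + 1), if_pos h]
      congr 2
      omega
    · rw [if_neg (by omega : ¬ b + 1 < a + 1), if_neg h]
  rw [hc]
  apply List.map_congr_left
  intro k _
  simp
  ring

lemma pyRange_neg_bottom (a y : Int) (hy : 0 < y) :
    PySem.List.pyRange a (-1) (-y) =
      PySem.List.pyRange a 0 (-y) ++ (if 0 ≤ a ∧ y ∣ a then [0] else []) := by
  rw [PySem.List.pyRange_of_neg _ _ (by omega : (-y) < 0),
    PySem.List.pyRange_of_neg _ _ (by omega : (-y) < 0)]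
  simp only [neg_neg]
  by_cases ha : 0 ≤ a
  · by_cases hd : y ∣ a
    · obtain ⟨q, hq⟩ := hd
      have hq0 : 0 ≤ q := by nlinarith [hq]
      have c1 : (if -1 < a then ((a - -1 + y - 1) / y).toNat else 0) = q.toNat + 1 := by
        rw [if_pos (by omega : -1 < a)]
        have hyq : y * (q + 1) = y * q + y := by ring
        have e : a - -1 + y - 1 = y * (q + 1) := by omega
        rw [e, Int.mul_ediv_cancel_left _ (by omega : y ≠ 0)]
        omega
      have c0 : (if 0 < a then ((a - 0 + y - 1) / y).toNat else 0) = q.toNat := by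
        by_cases h2 : 0 < a
        · have e : a - 0 + y - 1 = (y - 1) + y * q := by omega
          rw [if_pos h2, e, Int.add_mul_ediv_left _ _ (by omega : y ≠ 0),
            Int.ediv_eq_zero_of_lt (by omega) (by omega)]
          omega
        · have : q = 0 := by nlinarith [hq]
          simp [h2, this]
      rw [c1, c0, if_pos (show 0 ≤ a ∧ y ∣ a from ⟨ha, ⟨q, hq⟩⟩)]
      rw [List.range_succ, List.map_append]
      congr 1
      have hcast : ((q.toNat : Nat) : Int) = q := by omega
      simp [hcast]
      omega
    · have hlt : 0 < a := by
        rcases lt_or_eq_of_le ha with h | h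
        · exact h
        · exact absurd ⟨0, by omega⟩ hd
      set q := a / y with hqdef
      set r := a % y with hrdef
      have hdm : y * q + r = a := by rw [hqdef, hrdef]; exact Int.mul_ediv_add_emod _ _
      have hr0 : 0 ≤ r := Int.emod_nonneg _ (by omega)
      have hrx : r < y := Int.emod_lt_of_pos _ hy
      have hrne : r ≠ 0 := fun h => hd ⟨q, by omega⟩
      have hq0 : 0 ≤ q := Int.ediv_nonneg (by omega) (by omega)
      have c1 : (if -1 < a then ((a - -1 + y - 1) / y).toNat else 0) = q.toNat + 1 := by
        rw [if_pos (by omega : -1 < a)]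
        have e : a - -1 + y - 1 = (r + y) + y * q := by omega
        rw [e, Int.add_mul_ediv_left _ _ (by omega : y ≠ 0), ediv_mid r y hr0 hrx]
        omega
      have c0 : (if 0 < a then ((a - 0 + y - 1) / y).toNat else 0) = q.toNat + 1 := by
        rw [if_pos hlt]
        have e : a - 0 + y - 1 = ((r - 1) + y) + y * q := by omega
        rw [e, Int.add_mul_ediv_left _ _ (by omega : y ≠ 0), ediv_mid (r - 1) y (by omega) (by omega)]
        omega
      have hn1 : ¬ (0 ≤ a ∧ y ∣ a) := fun h => hd h.2
      rw [c1, c0, if_neg hn1]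
      simp
  · have hn1 : ¬ (0 ≤ a ∧ y ∣ a) := fun h => ha h.1
    rw [if_neg hn1, if_neg (by omega : ¬ (-1 : Int) < a), if_neg (by omega : ¬ (0 : Int) < a)]
    simp

lemma dvd_shift (x t : Int) : x ∣ t - x ↔ x ∣ t := by
  constructor
  · rintro ⟨c, hc⟩
    exact ⟨c + 1, by rw [mul_add, mul_one]; omega⟩
  · rintro ⟨c, hc⟩
    exact ⟨c - 1, by rw [mul_sub, mul_one]; omega⟩

lemma Apos (x : Int) (hx : 0 < x) (f : Int → Int) : ∀ n : Nat,
    ((PySem.List.pyRange (x - 1) (n : Int) x).map f).sum =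
      ((List.range n).map (fun (k : Nat) => if x ∣ ((k : Int) + 1) then f (k : Int) else 0)).sum := by
  intro n
  induction n with
  | zero =>
    rw [PySem.List.pyRange_of_pos _ _ hx]
    rw [if_neg (by push_cast; omega : ¬ (x - 1 : Int) < ((0 : Nat) : Int))]
    simp
  | succ n ih =>
    have hcast : ((n + 1 : Nat) : Int) = (n : Int) + 1 := by push_cast; ring
    rw [hcast, pyRange_succ_right_step _ _ _ hx, List.map_append, List.sum_append, ih,
      List.range_succ, List.map_append, List.sum_append]
    congr 1
    have hshift : x ∣ (n : Int) - (x - 1) ↔ x ∣ ((n : Int) + 1) := by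
      have : (n : Int) - (x - 1) = ((n : Int) + 1) - x := by ring
      rw [this, dvd_shift]
    by_cases hd : x ∣ ((n : Int) + 1)
    · have h1 : x - 1 ≤ (n : Int) := by
        have := Int.le_of_dvd (by omega) hd
        omega
      rw [if_pos ⟨h1, hshift.mpr hd⟩]
      simp [hd]
    · rw [if_neg (by rintro ⟨-, h⟩; exact hd (hshift.mp h))]
      simp [hd]

lemma Aneg (y : Int) (hy : 0 < y) : ∀ (n : Nat) (f : Int → Int),
    ((PySem.List.pyRange ((n : Int) - y) (-1) (-y)).map f).sum =
      ((List.range n).map (fun (k : Nat) => if y ∣ ((n : Int) - (k : Int)) then f (k : Int) else 0)).sum := by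
  intro n
  induction n with
  | zero =>
    intro f
    rw [PySem.List.pyRange_of_neg _ _ (by omega : -y < 0)]
    rw [if_neg (by push_cast; omega : ¬ (-1 : Int) < ((0 : Nat) : Int) - y)]
    simp
  | succ n ih =>
    intro f
    have hcast : ((n + 1 : Nat) : Int) = (n : Int) + 1 := by push_cast; ring
    have e1 := pyRange_neg_bottom ((n : Int) - y + 1) y hy
    have e2 := pyRange_neg_shift ((n : Int) - y) (-1) y hy
    rw [show (-1 : Int) + 1 = 0 from by ring] at e2
    rw [hcast, show (n : Int) + 1 - y = ((n : Int) - y) + 1 from by ring, e1, e2,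
      List.map_append, List.sum_append, List.map_map, ih]
    rw [List.range_succ_eq_map, List.map_cons, List.sum_cons, List.map_map]
    have hdvd : y ∣ ((n : Int) - y) + 1 ↔ y ∣ ((n : Int) + 1) := by
      have : (n : Int) - y + 1 = ((n : Int) + 1) - y := by ring
      rw [this, dvd_shift]
    have hhead : ((if 0 ≤ ((n : Int) - y) + 1 ∧ y ∣ ((n : Int) - y) + 1 then [(0 : Int)] else []).map f).sum
        = if y ∣ ((n : Int) + 1 - (0 : Int)) then f 0 else 0 := by
      by_cases hd : y ∣ ((n : Int) + 1)
      · have h1 : 0 ≤ ((n : Int) - y) + 1 := by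
          have := Int.le_of_dvd (by omega) hd
          omega
        rw [if_pos ⟨h1, hdvd.mpr hd⟩, if_pos (by simpa using hd)]
        simp
      · rw [if_neg (by rintro ⟨-, h⟩; exact hd (hdvd.mp h)), if_neg (by simpa using hd)]
        simp
    rw [hhead]
    rw [add_comm]
    have hmap : ∀ k ∈ List.range n,
        (fun (k : Nat) => if y ∣ (n : Int) - (k : Int) then (f ∘ fun x => x + 1) (k : Int) else 0) k
          = ((fun (k : Nat) => if y ∣ (n : Int) + 1 - (k : Int) then f (k : Int) else 0) ∘ Nat.succ) k := by
      intro k hk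
      have hc : ((Nat.succ k : Nat) : Int) = (k : Int) + 1 := by push_cast; ring
      simp only [Function.comp, hc]
      have harith : (n : Int) + 1 - ((k : Int) + 1) = (n : Int) - (k : Int) := by ring
      rw [harith]
    rw [List.map_congr_left hmap]
    simp

lemma Bsum (Q : Int → Bool) : ∀ (xs : List Int) (s : Int),
    (((PySem.List.enumerate xs s).filter (fun p => Q p.1)).map (·.2)).sum =
      ((List.range xs.length).map (fun (k : Nat) => if Q (s + (k : Int)) then xs.getD k 0 else 0)).sum := by
  intro xs
  induction xs with
  | nil => intro s; simp [PySem.List.enumerate]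
  | cons a xs ih =>
    intro s
    rw [PySem.List.enumerate_cons, List.filter_cons]
    rw [List.length_cons, List.range_succ_eq_map, List.map_cons, List.sum_cons, List.map_map]
    have htail : ((List.range xs.length).map ((fun (k : Nat) => if Q (s + (k : Int)) then (a :: xs).getD k 0 else 0) ∘ Nat.succ)).sum
        = (((PySem.List.enumerate xs (s + 1)).filter (fun p => Q p.1)).map (·.2)).sum := by
      rw [ih (s + 1)]
      apply congrArg
      apply List.map_congr_left
      intro k hk
      simp only [Function.comp]
      have h1 : s + ((k : Int) + 1) = s + 1 + (k : Int) := by ring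
      push_cast
      simp only [h1, List.getD_cons_succ]
    by_cases hq : Q s = true
    · rw [if_pos hq, List.map_cons, List.sum_cons, ← htail]
      simp [hq]
    · rw [if_neg hq, ← htail]
      have hq' : Q s = false := by simpa using hq
      simp [hq']

-- ===== VERDICT (by name: the statement is the Claim_ definition above) =====
theorem x_sum_loop_spec : Claim_equal_x_sum_loop := by
  intro nums x _
  unfold Spec_x_sum_loop

  by_cases h0 : x = 0
  · simp [x_sum_loop, x_sum_loop_alt, h0]
  · have hne : (x == 0) = false := by simpa using h0
    by_cases hp : x > 0
    · simp only [x_sum_loop, x_sum_loop_alt, hne, Bool.false_eq_true, if_false, if_pos hp]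
      rw [PySem.List.foldl_add _ (fun i => PySem.List.pyGetD nums i 0) 0, zero_add]
      rw [Apos x hp (fun i => PySem.List.pyGetD nums i 0) nums.length]
      rw [Bsum (fun i => PySem.Int.mod (i + 1) x == 0) nums 0]
      have hmap : ∀ k ∈ List.range nums.length,
          (fun (k : Nat) => if x ∣ ((k : Int) + 1) then (fun i => PySem.List.pyGetD nums i 0) (k : Int) else 0) k
            = (fun (k : Nat) => if ((PySem.Int.mod ((0 : Int) + (k : Int) + 1) x == 0) = true) then nums.getD k 0 else 0) k := by
        intro k hk
        simp [PySem.Int.mod_eq_zero_iff_dvd]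
      rw [List.map_congr_left hmap]
    · have hy : 0 < -x := by omega
      simp only [x_sum_loop, x_sum_loop_alt, hne, Bool.false_eq_true, if_false, if_neg hp]
      rw [PySem.List.foldl_add _ (fun i => PySem.List.pyGetD nums i 0) 0, zero_add]
      have hA := Aneg (-x) hy nums.length (fun i => PySem.List.pyGetD nums i 0)
      rw [neg_neg, sub_neg_eq_add] at hA
      rw [hA]
      rw [Bsum (fun i => PySem.Int.mod ((nums.length : Int) - i) (-x) == 0) nums 0]
      have hmap : ∀ k ∈ List.range nums.length,
          (fun (k : Nat) => if (-x) ∣ ((nums.length : Int) - (k : Int)) then (fun i => PySem.List.pyGetD nums i 0) (k : Int) else 0) k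
            = (fun (k : Nat) => if ((PySem.Int.mod ((nums.length : Int) - ((0 : Int) + (k : Int))) (-x) == 0) = true) then nums.getD k 0 else 0) k := by
        intro k hk
        simp [PySem.Int.mod_eq_zero_iff_dvd]
      rw [List.map_congr_left hmap]
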